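-- pv_equiv track=rewrite | github.com/Twyla123/AML_Final_Project | backend/agent/compare.py | format_compare_table
-- ===== SOURCE A (Python) =====
-- from typing import List, Dict
--
-- def format_compare_table(rows: List[Dict]) -> str:
--     """
--     Render a clean ASCII comparison table.
--     """
--
--     if not rows:
--         return ""
--
--     headers = list(rows[0].keys())
--     col_w = {
--         h: max(len(h), max(len(str(r[h])) for r in rows))
--         for h in headers
--     }
--
--     def fmt_row(r):
--         return " | ".join(str(r[h]).ljust(col_w[h]) for h in headers)
--
--     sep = "-+-".join("-" * col_w[h] for h in headers)
--
--     lines = [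
--         fmt_row({h: h for h in headers}),
--         sep,
--     ]
--     for r in rows:
--         lines.append(fmt_row(r))
--
--     return "\n".join(lines)
-- ===== SOURCE B (Python) =====
-- from typing import List, Dict
--
-- def format_compare_table(rows: List[Dict]) -> str:
--     """
--     Render the comparison table column-major: build each complete vertical
--     column (header cell, dash segment, data cells, all padded to the column's
--     width) and horizontally concatenate the columns into the output lines.
--     """
--     if not rows:
--         return ""
--
--     headers = list(rows[0].keys())
--
--     def column(h):
--         cells = [h] + [str(r[h]) for r in rows]
--         w = max(len(c) for c in cells)
--         padded = [c.ljust(w) for c in cells]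
--         return [padded[0], "-" * w] + padded[1:]
--
--     lines = [""] * (len(rows) + 2)
--     for j, h in enumerate(headers):
--         col = column(h)
--         lines = [l + ("" if j == 0 else "-+-" if i == 1 else " | ") + c
--                  for i, (l, c) in enumerate(zip(lines, col))]
--     return "\n".join(lines)
-- ===== Notes on version B (the rewrite author's own statement) =====
-- stated objective: alternative
-- what changed: Output is assembled column-major: each header yields one complete vertical column (padded header cell, dash segment, padded data cells) and the columns are folded together by horizontal string concatenation with per-line separators, instead of A's width dict plus row-by-row ' | '-join rendering.
import Mathlib
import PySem

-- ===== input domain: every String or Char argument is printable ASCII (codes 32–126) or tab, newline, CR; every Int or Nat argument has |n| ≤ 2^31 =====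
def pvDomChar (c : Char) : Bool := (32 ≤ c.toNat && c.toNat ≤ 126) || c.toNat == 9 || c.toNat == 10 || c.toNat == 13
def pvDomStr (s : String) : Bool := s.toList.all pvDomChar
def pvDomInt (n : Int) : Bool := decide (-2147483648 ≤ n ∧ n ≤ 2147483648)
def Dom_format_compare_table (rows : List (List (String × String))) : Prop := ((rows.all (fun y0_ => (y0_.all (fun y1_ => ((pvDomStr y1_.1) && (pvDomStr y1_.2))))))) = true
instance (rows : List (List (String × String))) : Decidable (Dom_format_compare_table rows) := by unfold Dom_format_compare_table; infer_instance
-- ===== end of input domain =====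

-- B assembles the output column-major: each header yields one complete vertical column
-- (padded header cell, dash segment, padded data cells) and the columns are horizontally
-- concatenated into the lines, instead of A's width dict + row-by-row join (objective: alternative).
-- Values are already strings under the type convention, so Python's str(...) is the identity here.

-- ===== PORT A =====

-- len(s) as a Nat (Python's len of a string is this nonnegative count)
def pvLen (s : String) : Nat := s.toList.length

-- s.ljust(w): pad with spaces on the right, never truncates
def pvLjust (s : String) (w : Nat) : String :=
  String.ofList (s.toList ++ List.replicate (w - s.toList.length) ' ')

-- "-" * w
def pvDashes (w : Nat) : String := String.ofList (List.replicate w '-')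

-- max(len(str(r[h])) for r in rows) — builtin max over a nonempty generator (rows ≠ [] in A's branch)
def pvAInnerMax (rows : List (List (String × String))) (h : String) : Nat :=
  match rows with
  | [] => 0  -- unreachable: A only evaluates this with rows nonempty
  | r :: rs =>
      rs.foldl (fun m x => max m (pvLen ((PySem.Dict.ofList x).getD h "")))
        (pvLen ((PySem.Dict.ofList r).getD h ""))

def format_compare_table (rows : List (List (String × String))) : String :=
  if rows.isEmpty then "" else
    let headers := (PySem.Dict.ofList (rows.headD [])).keys
    let col_w : PySem.Dict String Nat :=
      headers.foldl (fun d h => d.insert h (max (pvLen h) (pvAInnerMax rows h)))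
        PySem.Dict.empty
    let fmt_row := fun (r : PySem.Dict String String) =>
      PySem.Str.join " | " (headers.map (fun h => pvLjust (r.getD h "") (col_w.getD h 0)))
    let sep := PySem.Str.join "-+-" (headers.map (fun h => pvDashes (col_w.getD h 0)))
    let lines := [fmt_row (headers.foldl (fun d h => d.insert h h) PySem.Dict.empty), sep]
      ++ rows.map (fun r => fmt_row (PySem.Dict.ofList r))
    PySem.Str.join "\n" lines

-- ===== PORT B =====

-- max(len(c) for c in cells) — nonempty list of cell strings
def pvColMax (cells : List String) : Nat :=
  match cells with
  | [] => 0  -- unreachable: cells is h :: … in column(h)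
  | c :: cs => cs.foldl (fun m x => max m (pvLen x)) (pvLen c)

-- column(h): the full vertical column for header h — padded header cell, dash segment, padded data cells
def pvColumn (rows : List (List (String × String))) (h : String) : List String :=
  let cells := h :: rows.map (fun r => (PySem.Dict.ofList r).getD h "")
  let w := pvColMax cells
  let padded := cells.map (fun c => pvLjust c w)
  padded.headD "" :: pvDashes w :: padded.tail

def format_compare_table_alt (rows : List (List (String × String))) : String :=
  if rows.isEmpty then "" else
    let headers := (PySem.Dict.ofList (rows.headD [])).keys
    let lines := (PySem.List.enumerate headers 0).foldl (fun lines jh =>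
        let col := pvColumn rows jh.2
        (PySem.List.enumerate (lines.zip col) 0).map (fun ilc =>
          ilc.2.1 ++ (if jh.1 == 0 then "" else if ilc.1 == 1 then "-+-" else " | ") ++ ilc.2.2))
      (List.replicate (rows.length + 2) "")
    PySem.Str.join "\n" lines

-- ===== PRECONDITION & SPEC =====
-- Pre_ excludes inputs where some row lacks a key of the first row: both Pythons raise KeyError there.
def Pre_format_compare_table (rows : List (List (String × String))) : Prop :=
  ∀ r ∈ rows, ∀ h ∈ (PySem.Dict.ofList (rows.headD [])).keys,
    (PySem.Dict.ofList r).contains h = true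
instance (rows : List (List (String × String))) : Decidable (Pre_format_compare_table rows) := by
  unfold Pre_format_compare_table; infer_instance

def pvWitness_format_compare_table : (List (List (String × String))) :=
  [[("name", "m1"), ("acc", "0.91")], [("name", "m2"), ("acc", "0.8")]]

def Spec_format_compare_table (rows : List (List (String × String))) (out : String) : Prop := out = format_compare_table_alt rows
instance (rows : List (List (String × String))) (out : String) : Decidable (Spec_format_compare_table rows out) := by unfold Spec_format_compare_table; infer_instance

-- ===== CLAIM (what is proved, stated in full; the proofs are below) =====
def Claim_equal_format_compare_table : Prop := ∀ (rows : List (List (String × String))), Dom_format_compare_table rows → Pre_format_compare_table rows → Spec_format_compare_table rows (format_compare_table rows)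

-- ===== LEMMAS AND PROOFS =====

-- the column width B computes for h, named for the proofs
def pvW (rows : List (List (String × String))) (h : String) : Nat :=
  pvColMax (h :: rows.map (fun r => (PySem.Dict.ofList r).getD h ""))

-- the padded data cell of column h at row r
def pvCellS (rows : List (List (String × String))) (h : String) (r : List (String × String)) : String :=
  pvLjust ((PySem.Dict.ofList r).getD h "") (pvW rows h)

-- concatenation of sep ++ c over a list of cells (the part a join appends after its first element)
def pvExt (sep : String) (cs : List String) : String :=
  cs.foldr (fun c acc => sep ++ c ++ acc) ""

-- a dict comprehension {k: f(k) for k in ks} looked up at a key not in ks leaves d unchanged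
theorem pv_getD_foldl_insert_not_mem {ν : Type} (f : String → ν) (ks : List String)
    (d : PySem.Dict String ν) (h : String) (hh : h ∉ ks) (d0 : ν) :
    (ks.foldl (fun d k => d.insert k (f k)) d).getD h d0 = d.getD h d0 := by
  induction ks generalizing d with
  | nil => rfl
  | cons k t ih =>
    simp only [List.foldl_cons]
    rw [ih _ (by simp_all), PySem.Dict.getD_insert]
    simp_all

-- a dict comprehension {k: f(k) for k in ks} looked up at k ∈ ks yields f k
theorem pv_getD_foldl_insert_mem {ν : Type} (f : String → ν) (ks : List String)
    (d : PySem.Dict String ν) (h : String) (hh : h ∈ ks) (d0 : ν) :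
    (ks.foldl (fun d k => d.insert k (f k)) d).getD h d0 = f h := by
  induction ks generalizing d with
  | nil => simp at hh
  | cons k t ih =>
    simp only [List.foldl_cons]
    by_cases ht : h ∈ t
    · exact ih _ ht
    · have : h = k := by simp_all
      subst this
      rw [pv_getD_foldl_insert_not_mem _ _ _ _ ht, PySem.Dict.getD_insert]
      simp

-- pulling the left operand of a running max out of a foldl
theorem pv_foldl_max {α : Type} (g : α → Nat) (l : List α) (a b : Nat) :
    l.foldl (fun m x => max m (g x)) (max a b) = max a (l.foldl (fun m x => max m (g x)) b) := by
  induction l generalizing b with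
  | nil => rfl
  | cons x t ih => simp only [List.foldl_cons, Nat.max_assoc, ih]

-- B's width equals A's width entry when rows is nonempty
theorem pvW_eq (r0 : List (String × String)) (rs : List (List (String × String))) (h : String) :
    pvW (r0 :: rs) h = max (pvLen h) (pvAInnerMax (r0 :: rs) h) := by
  simp only [pvW, pvColMax, pvAInnerMax, List.map_cons, List.foldl_cons, List.foldl_map]
  rw [pv_foldl_max]

-- PySem.Str.join unfolded one step
theorem pv_join_cons_cons (sep x y : String) (t : List String) :
    PySem.Str.join sep (x :: y :: t) = x ++ sep ++ PySem.Str.join sep (y :: t) := by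
  simp [PySem.Str.join, PySem.Chars.join_cons_cons, String.append_assoc]

theorem pv_join_singleton (sep x : String) : PySem.Str.join sep [x] = x := by
  simp [PySem.Str.join, PySem.Chars.join_singleton]

theorem pv_join_nil (sep : String) : PySem.Str.join sep [] = "" := by
  simp [PySem.Str.join, PySem.Chars.join_nil]

-- a join is its first element followed by pvExt of the rest
theorem pv_join_eq_ext (sep x : String) (t : List String) :
    PySem.Str.join sep (x :: t) = x ++ pvExt sep t := by
  induction t generalizing x with
  | nil => simp [pv_join_singleton, pvExt]
  | cons y t ih =>
      rw [pv_join_cons_cons, ih y]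
      simp [pvExt, String.append_assoc]

-- pvColumn in explicit three-part form
theorem pvColumn_eq (rows : List (List (String × String))) (h : String) :
    pvColumn rows h
      = pvLjust h (pvW rows h) :: pvDashes (pvW rows h) :: rows.map (pvCellS rows h) := by
  simp [pvColumn, pvW, pvCellS, List.map_map, Function.comp_def]

-- mapping the j≠0 step over an enumeration starting at an index ≥ 2 never hits the i==1 branch
theorem pv_map_enum_ge_two (zs : List (String × String)) :
    ∀ k : Int, 2 ≤ k →
    (PySem.List.enumerate zs k).map (fun ilc =>
        ilc.2.1 ++ (if ilc.1 == 1 then "-+-" else " | ") ++ ilc.2.2)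
      = zs.map (fun lc => lc.1 ++ " | " ++ lc.2) := by
  induction zs with
  | nil => intro k _; rfl
  | cons z t ih =>
      intro k hk
      rw [PySem.List.enumerate_cons, List.map_cons, List.map_cons, ih (k + 1) (by omega)]
      have : (k == 1) = false := by simp; omega
      simp [this]

-- one j≠0 fold step in explicit three-part form
theorem pv_step_cons (j : Int) (hj : j ≠ 0) (a s x y : String) (ls cs : List String) :
    (PySem.List.enumerate ((a :: s :: ls).zip (x :: y :: cs)) 0).map (fun ilc =>
        ilc.2.1 ++ (if j == 0 then "" else if ilc.1 == 1 then "-+-" else " | ") ++ ilc.2.2)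
      = (a ++ " | " ++ x) :: (s ++ "-+-" ++ y) :: (ls.zip cs).map (fun lc => lc.1 ++ " | " ++ lc.2) := by
  have hjf : (j == 0) = false := by simp [hj]
  have h01 : ((0:Int) == 1) = false := by decide
  have h11 : ((0+1:Int) == 1) = true := by decide
  simp only [List.zip_cons_cons, PySem.List.enumerate_cons, List.map_cons, hjf,
    Bool.false_eq_true, if_false, h01, h11, if_true]
  rw [pv_map_enum_ge_two (ls.zip cs) (0+1+1) (by omega)]

-- re-zipping a zip-map against the same right list
theorem pv_zip_helper {ρ : Type} (g E : ρ → String) :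
    ∀ (ls : List String) (rs : List ρ), ls.length = rs.length →
    (((ls.zip (rs.map g)).map (fun lc => lc.1 ++ " | " ++ lc.2)).zip rs).map
        (fun lr => lr.1 ++ E lr.2)
      = (ls.zip rs).map (fun lr => lr.1 ++ (" | " ++ g lr.2 ++ E lr.2)) := by
  intro ls
  induction ls with
  | nil => intro rs _; rfl
  | cons l lt ih =>
      intro rs hlen
      cases rs with
      | nil => simp at hlen
      | cons r rt =>
          simp only [List.map_cons, List.zip_cons_cons, List.map_cons]
          rw [ih rt (by simpa using hlen)]
          simp [String.append_assoc]

-- zipping a map against its source list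
theorem pv_zip_map_self {ρ : Type} (g E : ρ → String) (rs : List ρ) :
    ((rs.map g).zip rs).map (fun lr => lr.1 ++ E lr.2)
      = rs.map (fun r => g r ++ E r) := by
  induction rs with
  | nil => rfl
  | cons r t ih => simp only [List.map_cons, List.zip_cons_cons, List.map_cons, ih]

-- copying a list into blank lines
theorem pv_map_zip_replicate (cs : List String) :
    ((List.replicate cs.length "").zip cs).map (fun lc => lc.1 ++ "" ++ lc.2) = cs := by
  induction cs with
  | nil => rfl
  | cons c t ih =>
      simp only [List.length_cons, List.replicate_succ, List.zip_cons_cons, List.map_cons, ih]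
      simp

-- the first (j = 0) step just copies the column into the blank lines
theorem pv_step_zero (cs : List String) :
    (PySem.List.enumerate ((List.replicate cs.length "").zip cs) 0).map (fun ilc =>
        ilc.2.1 ++ (if (0 : Int) == 0 then "" else if ilc.1 == 1 then "-+-" else " | ") ++ ilc.2.2)
      = cs := by
  have h0 : ((0 : Int) == 0) = true := by decide
  simp only [h0, if_true]
  have he : ∀ (zs : List (String × String)) (k : Int),
      (PySem.List.enumerate zs k).map (fun ilc => ilc.2.1 ++ "" ++ ilc.2.2)
        = zs.map (fun lc => lc.1 ++ "" ++ lc.2) := by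
    intro zs
    induction zs with
    | nil => intro k; rfl
    | cons z t ih => intro k; rw [PySem.List.enumerate_cons, List.map_cons, List.map_cons, ih]
  rw [he, pv_map_zip_replicate]

-- the fold over the remaining (j ≥ 1) columns, in explicit three-part form
theorem pv_fold_inv (rows : List (List (String × String))) (t : List String) :
    ∀ (k : Int), 1 ≤ k → ∀ (a s : String) (ls : List String), ls.length = rows.length →
    (PySem.List.enumerate t k).foldl (fun lines jh =>
        (PySem.List.enumerate (lines.zip (pvColumn rows jh.2)) 0).map (fun ilc =>
          ilc.2.1 ++ (if jh.1 == 0 then "" else if ilc.1 == 1 then "-+-" else " | ") ++ ilc.2.2))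
      (a :: s :: ls)
      = (a ++ pvExt " | " (t.map (fun h => pvLjust h (pvW rows h))))
        :: (s ++ pvExt "-+-" (t.map (fun h => pvDashes (pvW rows h))))
        :: (ls.zip rows).map (fun lr => lr.1 ++ pvExt " | " (t.map (fun h => pvCellS rows h lr.2))) := by
  induction t with
  | nil =>
      intro k _ a s ls hlen
      simp only [PySem.List.enumerate_nil, List.foldl_nil, List.map_nil]
      have h3 : (ls.zip rows).map (fun lr => lr.1 ++ pvExt " | " ([] : List String)) = ls := by
        have h4 : (ls.zip rows).map (fun lr => lr.1 ++ pvExt " | " ([] : List String))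
            = (ls.zip rows).map Prod.fst := by
          simp [pvExt]
        rw [h4, List.map_fst_zip (le_of_eq hlen)]
      rw [h3]
      simp [pvExt]
  | cons h t ih =>
      intro k hk a s ls hlen
      rw [PySem.List.enumerate_cons, List.foldl_cons]
      have hstep : (PySem.List.enumerate ((a :: s :: ls).zip (pvColumn rows h)) 0).map (fun ilc =>
            ilc.2.1 ++ (if k == 0 then "" else if ilc.1 == 1 then "-+-" else " | ") ++ ilc.2.2)
          = (a ++ " | " ++ pvLjust h (pvW rows h))
            :: (s ++ "-+-" ++ pvDashes (pvW rows h))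
            :: (ls.zip (rows.map (pvCellS rows h))).map (fun lc => lc.1 ++ " | " ++ lc.2) := by
        rw [pvColumn_eq]
        exact pv_step_cons k (by omega) a s _ _ ls (rows.map (pvCellS rows h))
      rw [hstep, ih (k + 1) (by omega) _ _ _ (by simp [List.length_zip, List.length_map, hlen])]
      rw [pv_zip_helper (pvCellS rows h)
            (fun r => pvExt " | " (t.map (fun h' => pvCellS rows h' r))) ls rows hlen]
      simp [pvExt, String.append_assoc]

-- B's whole column fold, for a nonempty header list, in explicit three-part form
theorem pv_fold_all (rows : List (List (String × String))) (h0 : String) (hs : List String) :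
    (PySem.List.enumerate (h0 :: hs) 0).foldl (fun lines jh =>
        (PySem.List.enumerate (lines.zip (pvColumn rows jh.2)) 0).map (fun ilc =>
          ilc.2.1 ++ (if jh.1 == 0 then "" else if ilc.1 == 1 then "-+-" else " | ") ++ ilc.2.2))
      (List.replicate (rows.length + 2) "")
      = (pvLjust h0 (pvW rows h0) ++ pvExt " | " (hs.map (fun h => pvLjust h (pvW rows h))))
        :: (pvDashes (pvW rows h0) ++ pvExt "-+-" (hs.map (fun h => pvDashes (pvW rows h))))
        :: rows.map (fun r => pvCellS rows h0 r
              ++ pvExt " | " (hs.map (fun h => pvCellS rows h r))) := by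
  rw [PySem.List.enumerate_cons, List.foldl_cons]
  have hrep : List.replicate (rows.length + 2) ""
      = List.replicate (pvColumn rows h0).length "" := by
    rw [pvColumn_eq]; simp
  rw [hrep, pv_step_zero (pvColumn rows h0), pvColumn_eq,
    pv_fold_inv rows hs (0+1) (by omega) _ _ _ (by simp)]
  rw [pv_zip_map_self (pvCellS rows h0)
        (fun r => pvExt " | " (hs.map (fun h' => pvCellS rows h' r)))]

-- both programs produce the same canonical line list joined by newlines
theorem pv_main (rows : List (List (String × String))) :
    format_compare_table rows = format_compare_table_alt rows := by
  cases rows with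
  | nil => rfl
  | cons r0 rs =>
    unfold format_compare_table format_compare_table_alt
    simp only [List.isEmpty_cons, Bool.false_eq_true, if_false, List.headD_cons]
    generalize hk : (PySem.Dict.ofList r0).keys = headers
    have hcw : ∀ h ∈ headers,
        (List.foldl (fun d h => d.insert h (max (pvLen h) (pvAInnerMax (r0 :: rs) h)))
          PySem.Dict.empty headers).getD h 0 = pvW (r0 :: rs) h :=
      fun h hh => by rw [pv_getD_foldl_insert_mem _ _ _ _ hh, pvW_eq]
    have hhd : ∀ h ∈ headers,
        (List.foldl (fun d h => d.insert h h) PySem.Dict.empty headers).getD h "" = h :=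
      fun h hh => pv_getD_foldl_insert_mem (fun h => h) _ _ _ hh _
    cases headers with
    | nil =>
        simp only [List.map_nil, PySem.List.enumerate_nil, List.foldl_nil]
        rw [pv_join_nil " | ", pv_join_nil "-+-"]
        congr 1
        simp [List.replicate_succ, List.map_const']
    | cons h0 hs =>
        rw [pv_fold_all (r0 :: rs) h0 hs]
        simp only [List.cons_append, List.nil_append]
        rw [show PySem.Str.join " | " ((h0 :: hs).map (fun h =>
                pvLjust ((List.foldl (fun d h => d.insert h h) PySem.Dict.empty (h0 :: hs)).getD h "")
                  ((List.foldl (fun d h => d.insert h (max (pvLen h) (pvAInnerMax (r0 :: rs) h)))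
                    PySem.Dict.empty (h0 :: hs)).getD h 0)))
              = pvLjust h0 (pvW (r0 :: rs) h0)
                ++ pvExt " | " (hs.map (fun h => pvLjust h (pvW (r0 :: rs) h))) from by
            rw [show ((h0 :: hs).map (fun h =>
                pvLjust ((List.foldl (fun d h => d.insert h h) PySem.Dict.empty (h0 :: hs)).getD h "")
                  ((List.foldl (fun d h => d.insert h (max (pvLen h) (pvAInnerMax (r0 :: rs) h)))
                    PySem.Dict.empty (h0 :: hs)).getD h 0)))
                = (h0 :: hs).map (fun h => pvLjust h (pvW (r0 :: rs) h)) from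
              List.map_congr_left (fun h hh => by rw [hcw h hh, hhd h hh])]
            rw [List.map_cons, pv_join_eq_ext]]
        rw [show PySem.Str.join "-+-" ((h0 :: hs).map (fun h =>
                pvDashes ((List.foldl (fun d h => d.insert h (max (pvLen h) (pvAInnerMax (r0 :: rs) h)))
                    PySem.Dict.empty (h0 :: hs)).getD h 0)))
              = pvDashes (pvW (r0 :: rs) h0)
                ++ pvExt "-+-" (hs.map (fun h => pvDashes (pvW (r0 :: rs) h))) from by
            rw [show ((h0 :: hs).map (fun h =>
                pvDashes ((List.foldl (fun d h => d.insert h (max (pvLen h) (pvAInnerMax (r0 :: rs) h)))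
                    PySem.Dict.empty (h0 :: hs)).getD h 0)))
                = (h0 :: hs).map (fun h => pvDashes (pvW (r0 :: rs) h)) from
              List.map_congr_left (fun h hh => by rw [hcw h hh])]
            rw [List.map_cons, pv_join_eq_ext]]
        rw [show ((r0 :: rs).map (fun r => PySem.Str.join " | " ((h0 :: hs).map (fun h =>
                pvLjust ((PySem.Dict.ofList r).getD h "")
                  ((List.foldl (fun d h => d.insert h (max (pvLen h) (pvAInnerMax (r0 :: rs) h)))
                    PySem.Dict.empty (h0 :: hs)).getD h 0)))))
              = (r0 :: rs).map (fun r => pvCellS (r0 :: rs) h0 r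
                  ++ pvExt " | " (hs.map (fun h => pvCellS (r0 :: rs) h r))) from
            List.map_congr_left (fun r _ => by
              rw [show ((h0 :: hs).map (fun h =>
                  pvLjust ((PySem.Dict.ofList r).getD h "")
                    ((List.foldl (fun d h => d.insert h (max (pvLen h) (pvAInnerMax (r0 :: rs) h)))
                      PySem.Dict.empty (h0 :: hs)).getD h 0)))
                  = (h0 :: hs).map (fun h => pvCellS (r0 :: rs) h r) from
                List.map_congr_left (fun h hh => by rw [hcw h hh]; rfl)]
              rw [List.map_cons, pv_join_eq_ext])]

-- ===== VERDICT (by name: the statement is the Claim_ definition above) =====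
theorem format_compare_table_spec : Claim_equal_format_compare_table := by
  intro rows _ _
  exact pv_main rows
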